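-- pv_equiv track=rewrite | github.com/Royc4515/AgentCheck | analyzer.py | analyze_tool_calls
-- ===== SOURCE A (Python) =====
-- from collections import Counter
--
-- def analyze_tool_calls(log_data):
--     """Scans for redundant tool invocations."""
--     tools_used = log_data["execution_log"]["steps"][0].get("tools_used", [])
--     tool_counts = Counter(tools_used)
--
--     penalty_points = 0
--     redundant_tools = []
--
--     for tool, count in tool_counts.items():
--         if count > 1:
--             # Penalty for redundant calls
--             penalty_points += (count - 1) * 10
--             redundant_tools.append(f"{tool}")
--
--     return penalty_points, redundant_tools
-- ===== SOURCE B (Python) =====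
-- def analyze_tool_calls(log_data):
--     """Scans for redundant tool invocations."""
--     tools_used = log_data["execution_log"]["steps"][0].get("tools_used", [])
--     # Map-free positional scan: each call that already occurred earlier costs 10;
--     # a tool is reported at its first occurrence iff it occurs again later.
--     penalty_points = 10 * sum(1 for i, t in enumerate(tools_used) if t in tools_used[:i])
--     redundant_tools = [f"{t}" for i, t in enumerate(tools_used)
--                        if t not in tools_used[:i] and t in tools_used[i + 1:]]
--     return penalty_points, redundant_tools
-- ===== Notes on version B (the rewrite author's own statement) =====
-- stated objective: alternative
-- what changed: B drops the count map entirely: instead of A's Counter plus a loop over its items, B scans positions directly, charging 10 for every call that already occurred earlier (t in tools_used[:i]) and listing a tool at its first occurrence iff it occurs again later (t in tools_used[i+1:]).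
import Mathlib
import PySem

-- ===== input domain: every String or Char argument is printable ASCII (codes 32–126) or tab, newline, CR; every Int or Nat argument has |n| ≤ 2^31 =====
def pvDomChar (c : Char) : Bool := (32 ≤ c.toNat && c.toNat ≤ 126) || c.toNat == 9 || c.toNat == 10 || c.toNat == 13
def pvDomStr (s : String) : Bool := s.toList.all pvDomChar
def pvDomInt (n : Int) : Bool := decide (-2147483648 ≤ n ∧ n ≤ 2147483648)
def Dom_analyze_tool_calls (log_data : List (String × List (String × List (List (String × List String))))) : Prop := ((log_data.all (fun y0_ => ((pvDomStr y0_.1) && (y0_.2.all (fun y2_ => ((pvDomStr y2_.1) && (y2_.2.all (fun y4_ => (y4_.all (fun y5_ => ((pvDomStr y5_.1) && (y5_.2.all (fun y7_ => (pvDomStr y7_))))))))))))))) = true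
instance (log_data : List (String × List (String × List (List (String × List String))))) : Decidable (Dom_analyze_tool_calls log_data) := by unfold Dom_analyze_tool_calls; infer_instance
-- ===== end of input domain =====

-- B replaces A's Counter-and-loop by a map-free positional scan: every call with an
-- earlier equal call costs 10, and a tool is reported at its first occurrence iff it
-- recurs later (objective: alternative).

-- ===== PORT A =====
-- literal port: tools_used = log_data["execution_log"]["steps"][0].get("tools_used", []),
-- Counter, then a loop over its items accumulating penalty and the redundant list.
def analyze_tool_calls (log_data : List (String × List (String × List (List (String × List String))))) : Int × List String :=
  match (PySem.Dict.mk log_data).get? "execution_log" with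
  | none => (0, [])  -- KeyError in Python; excluded by Pre_
  | some execlog =>
    match (PySem.Dict.mk execlog).get? "steps" with
    | none => (0, [])  -- KeyError in Python; excluded by Pre_
    | some steps =>
      match PySem.List.pyGet? steps 0 with
      | none => (0, [])  -- IndexError in Python; excluded by Pre_
      | some step0 =>
        let tools_used := (PySem.Dict.mk step0).getD "tools_used" []
        let tool_counts := PySem.Dict.counter tools_used
        tool_counts.items.foldl
          (fun acc kv => if kv.2 > 1 then (acc.1 + (kv.2 - 1) * 10, acc.2 ++ [kv.1]) else acc)
          ((0 : Int), ([] : List String))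

-- ===== PORT B =====
-- literal port of Source B: positional scan with slices, no count map.
def analyze_tool_calls_alt (log_data : List (String × List (String × List (List (String × List String))))) : Int × List String :=
  match (PySem.Dict.mk log_data).get? "execution_log" with
  | none => (0, [])  -- KeyError in Python; excluded by Pre_
  | some execlog =>
    match (PySem.Dict.mk execlog).get? "steps" with
    | none => (0, [])  -- KeyError in Python; excluded by Pre_
    | some steps =>
      match PySem.List.pyGet? steps 0 with
      | none => (0, [])  -- IndexError in Python; excluded by Pre_
      | some step0 =>
        let tools_used := (PySem.Dict.mk step0).getD "tools_used" []
        -- 10 * sum(1 for i, t in enumerate(tools_used) if t in tools_used[:i])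
        let penalty_points := 10 *
          (((PySem.List.enumerate tools_used 0).filter
              (fun p => (PySem.List.slice tools_used none (some p.1)).contains p.2)).map
            (fun _ => (1 : Int))).sum
        -- [f"{t}" for i, t in enumerate(tools_used) if t not in tools_used[:i] and t in tools_used[i+1:]]
        let redundant_tools := ((PySem.List.enumerate tools_used 0).filter
            (fun p => !(PySem.List.slice tools_used none (some p.1)).contains p.2
                && (PySem.List.slice tools_used (some (p.1 + 1)) none).contains p.2)).map (·.2)
        (penalty_points, redundant_tools)

-- ===== PRECONDITION & SPEC =====
-- Pre_ excludes exactly the inputs where A raises: missing "execution_log" or "steps" key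
-- (KeyError) or an empty steps list (IndexError).
def Pre_analyze_tool_calls (log_data : List (String × List (String × List (List (String × List String))))) : Prop :=
  ((((PySem.Dict.mk log_data).get? "execution_log").bind
      (fun e => (PySem.Dict.mk e).get? "steps")).elim false
      (fun steps => !steps.isEmpty)) = true
instance (log_data : List (String × List (String × List (List (String × List String))))) : Decidable (Pre_analyze_tool_calls log_data) := by unfold Pre_analyze_tool_calls; infer_instance

def pvWitness_analyze_tool_calls : (List (String × List (String × List (List (String × List String))))) :=
  [("execution_log", [("steps", [[("tools_used", ["a", "b", "a"])]])])]

def Spec_analyze_tool_calls (log_data : List (String × List (String × List (List (String × List String))))) (out : Int × List String) : Prop := out = analyze_tool_calls_alt log_data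
instance (log_data : List (String × List (String × List (List (String × List String))))) (out : Int × List String) : Decidable (Spec_analyze_tool_calls log_data out) := by unfold Spec_analyze_tool_calls; infer_instance

-- ===== CLAIM (what is proved, stated in full; the proofs are below) =====
def Claim_equal_analyze_tool_calls : Prop := ∀ (log_data : List (String × List (String × List (List (String × List String))))), Dom_analyze_tool_calls log_data → Pre_analyze_tool_calls log_data → Spec_analyze_tool_calls log_data (analyze_tool_calls log_data)

-- ===== LEMMAS AND PROOFS =====

-- A's loop over the items, decomposed into sum + filter/map.
lemma foldA_decomp (l : List (String × Int)) (p : Int) (ls : List String) :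
    l.foldl (fun acc kv => if kv.2 > 1 then (acc.1 + (kv.2 - 1) * 10, acc.2 ++ [kv.1]) else acc) (p, ls)
      = (p + (l.map (fun kv => if kv.2 > 1 then (kv.2 - 1) * 10 else 0)).sum,
         ls ++ (l.filter (fun p => p.2 > 1)).map (·.1)) := by
  induction l generalizing p ls with
  | nil => simp
  | cons kv t ih =>
    by_cases h : kv.2 > 1 <;> simp [h, ih, add_assoc]

lemma sum_shift (l : List Int) : (l.map (fun c => (c - 1) * 10)).sum = 10 * (l.sum - l.length) := by
  induction l with
  | nil => simp
  | cons c t ih => simp [ih]; ring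

lemma sum_count_ofList (xs : List String) :
    ((PySem.Set.ofList xs).map (fun k => (xs.count k : Int))).sum = (xs.length : Int) := by
  have hperm : (PySem.Set.ofList xs).Perm xs.dedup := by
    refine (List.perm_ext_iff_of_nodup (PySem.Set.nodup_ofList xs) xs.nodup_dedup).mpr ?_
    intro a; simp [PySem.Set.mem_ofList, List.mem_dedup]
  calc ((PySem.Set.ofList xs).map (fun k => (xs.count k : Int))).sum
      = (xs.dedup.map (fun k => (xs.count k : Int))).sum :=
        (hperm.map _).sum_eq
    _ = ((xs.dedup.map (fun k => xs.count k)).sum : Int) := by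
        push_cast
        simp [Function.comp_def]
    _ = (xs.length : Int) := by rw [List.sum_map_count_dedup_eq_length]

-- A's value on any tools list, in closed form.
lemma coreA_eq (xs : List String) :
    (PySem.Dict.counter xs).items.foldl
        (fun acc kv => if kv.2 > 1 then (acc.1 + (kv.2 - 1) * 10, acc.2 ++ [kv.1]) else acc)
        ((0 : Int), ([] : List String))
      = (10 * ((xs.length : Int) - ((PySem.Set.ofList xs).length : Int)),
         (PySem.Set.ofList xs).filter (fun k => decide (xs.count k > 1))) := by
  rw [foldA_decomp]
  refine Prod.ext ?_ ?_
  · simp only [PySem.Dict.items_counter]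
    have hmap : ((PySem.Set.ofList xs).map
          ((fun kv : String × Int => if kv.2 > 1 then (kv.2 - 1) * 10 else 0) ∘
            (fun k => (k, (xs.count k : Int)))))
        = (PySem.Set.ofList xs).map (fun k => ((xs.count k : Int) - 1) * 10) := by
      refine List.map_congr_left ?_
      intro k hk
      have hk' : k ∈ xs := (PySem.Set.mem_ofList _ _).mp hk
      have hc : 1 ≤ xs.count k := List.count_pos_iff.mpr hk'
      by_cases h : (xs.count k : Int) > 1
      · simp [h]
      · have : (xs.count k : Int) = 1 := by omega
        simp [this]
    rw [List.map_map, hmap]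
    have := sum_shift ((PySem.Set.ofList xs).map (fun k => (xs.count k : Int)))
    simp only [List.map_map, Function.comp_def] at this ⊢
    rw [this, sum_count_ofList]
    simp
  · simp only [PySem.Dict.items_counter, List.filter_map, List.map_map]
    simp [Function.comp_def]

-- B's penalty count: duplicates-so-far scan, with the already-seen prefix generalized.
lemma coreB_count (rest pre : List String) :
    ((PySem.List.enumerate rest (pre.length : Int)).filter
        (fun p => (PySem.List.slice (pre ++ rest) none (some p.1)).contains p.2)).length
      + (PySem.Set.ofList (pre ++ rest)).length
    = rest.length + (PySem.Set.ofList pre).length := by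
  induction rest generalizing pre with
  | nil => simp
  | cons t r ih =>
    have hre : pre ++ t :: r = (pre ++ [t]) ++ r := by simp
    have hstart : (pre.length : Int) + 1 = (((pre ++ [t]).length : Nat) : Int) := by simp
    rw [PySem.List.enumerate_cons, List.filter_cons, hre, hstart]
    have hslice : PySem.List.slice ((pre ++ [t]) ++ r) none (some (pre.length : Int)) = pre := by
      rw [List.append_assoc, PySem.List.slice_to_natCast]; exact List.take_left
    rw [hslice]
    have hih := ih (pre ++ [t])
    by_cases hmem : t ∈ pre
    · have hof : PySem.Set.ofList (pre ++ [t]) = PySem.Set.ofList pre := by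
        rw [PySem.Set.ofList_append_singleton,
          PySem.Set.add_of_mem ((PySem.Set.mem_ofList _ _).mpr hmem)]
      rw [hof] at hih
      simp [hmem] at hih ⊢
      omega
    · have hof : PySem.Set.ofList (pre ++ [t]) = PySem.Set.ofList pre ++ [t] := by
        rw [PySem.Set.ofList_append_singleton,
          PySem.Set.add_of_not_mem (fun h => hmem ((PySem.Set.mem_ofList _ _).mp h))]
      rw [hof] at hih
      simp [hmem] at hih ⊢
      omega

-- B's redundant list: first occurrences that recur later, prefix generalized.
lemma coreB_list (rest pre : List String) :
    ((PySem.List.enumerate rest (pre.length : Int)).filter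
        (fun p => !(PySem.List.slice (pre ++ rest) none (some p.1)).contains p.2
            && (PySem.List.slice (pre ++ rest) (some (p.1 + 1)) none).contains p.2)).map (·.2)
    = (PySem.Set.ofList rest).filter (fun k => !pre.contains k && decide (rest.count k > 1)) := by
  induction rest generalizing pre with
  | nil => simp
  | cons t r ih =>
    have hre : pre ++ t :: r = (pre ++ [t]) ++ r := by simp
    have hstart : (pre.length : Int) + 1 = (((pre ++ [t]).length : Nat) : Int) := by simp
    rw [PySem.List.enumerate_cons, List.filter_cons, hre, hstart]
    have hslice : PySem.List.slice ((pre ++ [t]) ++ r) none (some (pre.length : Int)) = pre := by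
      rw [List.append_assoc, PySem.List.slice_to_natCast]; exact List.take_left
    have hslice2 : PySem.List.slice ((pre ++ [t]) ++ r)
        (some (((pre ++ [t]).length : Nat) : Int)) none = r := by
      rw [PySem.List.slice_from_natCast]; exact List.drop_left
    rw [hslice, hslice2]
    have hih := ih (pre ++ [t])
    rw [PySem.Set.ofList_cons, List.filter_cons]
    have hfilter : (PySem.Set.discard (PySem.Set.ofList r) t).filter
          (fun k => !pre.contains k && decide ((t :: r).count k > 1))
        = (PySem.Set.ofList r).filter
          (fun k => !(pre ++ [t]).contains k && decide (r.count k > 1)) := by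
      have hdisc : PySem.Set.discard (PySem.Set.ofList r) t
          = (PySem.Set.ofList r).filter (fun y => y != t) := rfl
      rw [hdisc, List.filter_filter]
      refine List.filter_congr ?_
      intro k _
      by_cases hk : k = t
      · subst hk; simp
      · have hc : (t :: r).count k = r.count k := by
          simp [List.count_cons]
          exact fun h => hk h.symm
        simp [hk, hc, List.contains_eq_mem]
    simp only [List.contains_eq_mem] at hih hfilter ⊢
    by_cases hmem : t ∈ pre
    · rw [if_neg (by simp [hmem]), if_neg (by simp [hmem]), hih, ← hfilter]
    · by_cases hr : t ∈ r
      · rw [if_pos (by simp [hmem, hr]), if_pos (by simp [hmem, hr]),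
          List.map_cons, hih, ← hfilter]
      · rw [if_neg (by simp [hr]), if_neg (by simp [hmem, hr]),
          hih, ← hfilter]

-- the two closed forms coincide, giving B = A on any tools list
lemma coreB_eq (xs : List String) :
    (10 * (((PySem.List.enumerate xs 0).filter
            (fun p => (PySem.List.slice xs none (some p.1)).contains p.2)).map
          (fun _ => (1 : Int))).sum,
      ((PySem.List.enumerate xs 0).filter
          (fun p => !(PySem.List.slice xs none (some p.1)).contains p.2
              && (PySem.List.slice xs (some (p.1 + 1)) none).contains p.2)).map (·.2))
    = (10 * ((xs.length : Int) - ((PySem.Set.ofList xs).length : Int)),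
       (PySem.Set.ofList xs).filter (fun k => decide (xs.count k > 1))) := by
  have h1 := coreB_count xs []
  have h2 := coreB_list xs []
  simp only [List.nil_append, List.length_nil, Nat.cast_zero, PySem.Set.ofList_nil] at h1 h2
  refine Prod.ext ?_ ?_
  · have hsum : ∀ (l : List (Int × String)), (l.map (fun _ => (1 : Int))).sum = (l.length : Int) := by
      intro l; induction l with
      | nil => simp
      | cons a t ih =>
          simp
          omega
    simp only [hsum]
    simp at h1 ⊢
    omega
  · rw [h2]
    simp

-- ===== VERDICT (by name: the statement is the Claim_ definition above) =====
theorem analyze_tool_calls_spec : Claim_equal_analyze_tool_calls := by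
  intro log_data _ _
  unfold Spec_analyze_tool_calls analyze_tool_calls analyze_tool_calls_alt
  cases h1 : (PySem.Dict.mk log_data).get? "execution_log" with
  | none => rfl
  | some execlog =>
    dsimp only
    cases h2 : (PySem.Dict.mk execlog).get? "steps" with
    | none => rfl
    | some steps =>
      dsimp only
      cases h3 : PySem.List.pyGet? steps 0 with
      | none => rfl
      | some step0 =>
        dsimp only
        rw [coreA_eq, coreB_eq]
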